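-- pv_equiv track=rewrite | github.com/j0a0luc4s/csi22 | list/2/solution/3.py | has_alnum
-- ===== SOURCE A (Python) =====
-- def has_alnum(strings):
--
--     new_strings = []
--
--     def has_alpha(string):
--         for char in string:
--             if char.isalpha():
--                 return True
--         return False
--
--     def has_numeric(string):
--         for char in string:
--             if char.isnumeric():
--                 return True
--         return False
--
--     for string in strings:
--         if has_alpha(string) and has_numeric(string):
--             new_strings.append(string)
--
--     return new_strings
-- ===== SOURCE B (Python) =====
-- def has_alnum(strings):
--     result = []
--     for string in strings:
--         found_alpha = False
--         found_numeric = False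
--         for char in string:
--             if not found_alpha and char.isalpha():
--                 found_alpha = True
--             if not found_numeric and char.isnumeric():
--                 found_numeric = True
--             if found_alpha and found_numeric:
--                 break
--         if found_alpha and found_numeric:
--             result.append(string)
--     return result
-- ===== Notes on version B (the rewrite author's own statement) =====
-- stated objective: alternative
-- what changed: Replaces A's two independent full scans per string (helper functions has_alpha/has_numeric) with one combined scan maintaining two flags and breaking as soon as both are set.
import Mathlib
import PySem

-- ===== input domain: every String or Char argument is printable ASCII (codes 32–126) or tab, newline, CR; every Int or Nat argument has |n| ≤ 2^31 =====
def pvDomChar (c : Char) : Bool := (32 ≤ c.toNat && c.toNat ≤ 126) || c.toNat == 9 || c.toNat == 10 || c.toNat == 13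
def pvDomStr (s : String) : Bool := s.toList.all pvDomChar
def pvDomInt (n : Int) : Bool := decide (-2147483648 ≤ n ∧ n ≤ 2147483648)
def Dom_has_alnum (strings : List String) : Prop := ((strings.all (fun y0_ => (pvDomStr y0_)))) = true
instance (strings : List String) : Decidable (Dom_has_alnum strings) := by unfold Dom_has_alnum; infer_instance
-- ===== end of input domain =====

-- B replaces A's two independent full scans per string (two helper functions) with one
-- combined scan carrying two flags and breaking early once both are set (alternative, same cost).


-- ===== PORT A =====
-- helper has_alpha: scan the chars, return True at the first alphabetic one
def pvHasAlphaA : List Char → Bool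
  | [] => false
  | c :: cs => if PySem.Chars.isalpha c then true else pvHasAlphaA cs

-- helper has_numeric: scan the chars, return True at the first numeric one
-- (char.isnumeric = char.isdigit on the ASCII domain; exact there)
def pvHasNumericA : List Char → Bool
  | [] => false
  | c :: cs => if PySem.Chars.isdigit c then true else pvHasNumericA cs

def has_alnum (strings : List String) : List String :=
  strings.foldl
    (fun new_strings s =>
      if pvHasAlphaA s.toList && pvHasNumericA s.toList then new_strings ++ [s]
      else new_strings)
    []

-- ===== PORT B =====
-- one combined scan: two flags, break as soon as both are set; returns the final flags
def pvScanB : List Char → Bool → Bool → Bool × Bool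
  | [], fa, fn => (fa, fn)
  | c :: cs, fa, fn =>
      let fa' := if !fa && PySem.Chars.isalpha c then true else fa
      let fn' := if !fn && PySem.Chars.isdigit c then true else fn
      if fa' && fn' then (fa', fn') else pvScanB cs fa' fn'

def has_alnum_alt (strings : List String) : List String :=
  strings.foldl
    (fun result s =>
      let r := pvScanB s.toList false false
      if r.1 && r.2 then result ++ [s] else result)
    []

-- ===== PRECONDITION & SPEC =====
def Spec_has_alnum (strings : List String) (out : List String) : Prop := out = has_alnum_alt strings
instance (strings : List String) (out : List String) : Decidable (Spec_has_alnum strings out) := by unfold Spec_has_alnum; infer_instance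

-- ===== CLAIM (what is proved, stated in full; the proofs are below) =====
def Claim_equal_has_alnum : Prop := ∀ (strings : List String), Dom_has_alnum strings → Spec_has_alnum strings (has_alnum strings)

-- ===== LEMMAS AND PROOFS =====

-- B's combined flag scan computes exactly "some alpha seen" and "some digit seen"
theorem pvScanB_spec (cs : List Char) (fa fn : Bool) :
    ((pvScanB cs fa fn).1 && (pvScanB cs fa fn).2)
      = ((fa || pvHasAlphaA cs) && (fn || pvHasNumericA cs)) := by
  induction cs generalizing fa fn with
  | nil => simp [pvScanB, pvHasAlphaA, pvHasNumericA]
  | cons c cs ih =>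
      simp only [pvScanB, pvHasAlphaA, pvHasNumericA]
      by_cases ha : PySem.Chars.isalpha c <;>
        by_cases hn : PySem.Chars.isdigit c <;>
          cases fa <;> cases fn <;> simp [ha, hn, ih]

theorem pv_foldl_eq (strings : List String) (acc : List String) :
    strings.foldl
      (fun new_strings s =>
        if pvHasAlphaA s.toList && pvHasNumericA s.toList then new_strings ++ [s]
        else new_strings) acc
    = strings.foldl
      (fun result s =>
        let r := pvScanB s.toList false false
        if r.1 && r.2 then result ++ [s] else result) acc := by
  induction strings generalizing acc with
  | nil => rfl
  | cons s rest ih =>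
      simp only [List.foldl_cons, pvScanB_spec, Bool.false_or]

-- ===== VERDICT (by name: the statement is the Claim_ definition above) =====
theorem has_alnum_spec : Claim_equal_has_alnum := by
  intro strings _
  unfold Spec_has_alnum has_alnum has_alnum_alt
  exact pv_foldl_eq strings []
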